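-- pv_equiv track=rewrite | github.com/matheusdguerra/pacote-desafios-pythonicos | 11_remove_adjacent.py | findAdjacentElements
-- ===== SOURCE A (Python) =====
-- def findAdjacentElements(test_list):
--     res = []
--     for idx, ele in enumerate(test_list):
--
--         if idx == 0:
--             if test_list[idx] != test_list[idx + 1]:
--                 res.append(test_list[idx])
--
--         elif idx == len(test_list) - 1:
--             if test_list[idx] != test_list[idx - 1]:
--                 res.append(test_list[idx])
--
--         elif test_list[idx] != test_list[idx + 1]:
--             res.append(test_list[idx])
--
--     return res
-- ===== SOURCE B (Python) =====
-- def findAdjacentElements(test_list):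
--     # Phase 1: run-length encode the list into [value, count] runs.
--     runs = []
--     for x in test_list:
--         if runs and runs[-1][0] == x:
--             runs[-1][1] += 1
--         else:
--             runs.append([x, 1])
--     # Phase 2: every non-final run contributes its value (its last element
--     # differs from the next run's value); the final run's value is kept only
--     # if that run is a singleton preceded by a different run.
--     res = [v for v, _ in runs[:-1]]
--     if len(runs) >= 2 and runs[-1][1] == 1:
--         res.append(runs[-1][0])
--     return res
-- ===== Notes on version B (the rewrite author's own statement) =====
-- stated objective: alternative
-- what changed: Replaced A's index-driven loop with positional branches by a two-phase algorithm: first run-length-encode the list into (value,count) runs, then emit the value of every non-final run plus the final run's value when that run is a singleton.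
-- crash fix: On single-element lists A raises IndexError (it reads test_list[1]); B returns an empty list, since the lone element has no differing neighbor. — e.g. on findAdjacentElements([5]): A raises IndexError, B returns []
import Mathlib
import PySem

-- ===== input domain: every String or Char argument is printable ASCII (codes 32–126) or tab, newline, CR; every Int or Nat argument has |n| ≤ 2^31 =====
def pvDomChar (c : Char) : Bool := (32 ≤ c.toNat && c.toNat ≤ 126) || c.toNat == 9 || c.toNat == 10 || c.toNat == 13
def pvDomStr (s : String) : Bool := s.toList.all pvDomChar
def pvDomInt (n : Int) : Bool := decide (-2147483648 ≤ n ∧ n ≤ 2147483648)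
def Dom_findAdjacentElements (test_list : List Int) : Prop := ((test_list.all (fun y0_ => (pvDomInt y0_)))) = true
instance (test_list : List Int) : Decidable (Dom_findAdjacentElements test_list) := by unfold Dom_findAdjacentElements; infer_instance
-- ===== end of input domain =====

-- B replaces A's index-driven loop (with special branches for first/last position) by a
-- two-phase algorithm: run-length-encode the list into (value,count) runs, then emit the
-- value of every non-final run plus the final run's value when that run is a singleton.

-- ===== PORT A =====
-- literal transliteration of A: foldl over enumerate, three positional branches, all reads via pyGetD
def findAdjacentElements (test_list : List Int) : List Int :=
  (PySem.List.enumerate test_list).foldl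
    (fun res p =>
      if p.1 = 0 then
        if PySem.List.pyGetD test_list p.1 0 ≠ PySem.List.pyGetD test_list (p.1 + 1) 0 then
          res ++ [PySem.List.pyGetD test_list p.1 0]
        else res
      else if p.1 = (test_list.length : Int) - 1 then
        if PySem.List.pyGetD test_list p.1 0 ≠ PySem.List.pyGetD test_list (p.1 - 1) 0 then
          res ++ [PySem.List.pyGetD test_list p.1 0]
        else res
      else
        if PySem.List.pyGetD test_list p.1 0 ≠ PySem.List.pyGetD test_list (p.1 + 1) 0 then
          res ++ [PySem.List.pyGetD test_list p.1 0]
        else res)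
    []

-- ===== PORT B =====
-- the body of Source B's first loop: extend the run list with one element
def pvRunStep (runs : List (Int × Int)) (x : Int) : List (Int × Int) :=
  match runs.getLast? with
  | some p => if p.1 = x then runs.dropLast ++ [(p.1, p.2 + 1)] else runs ++ [(x, 1)]
  | none => runs ++ [(x, 1)]

-- literal transliteration of Source B: run-length encode, then emit (runs[:-1] as a slice,
-- runs[-1] read via getLast? under the len >= 2 guard, as in the Python)
def findAdjacentElements_alt (test_list : List Int) : List Int :=
  let runs := test_list.foldl pvRunStep []
  let res := (PySem.List.slice runs none (some (-1))).map (fun p => p.1)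
  if 2 ≤ runs.length then
    match runs.getLast? with
    | some p => if p.2 = 1 then res ++ [p.1] else res
    | none => res
  else res

-- ===== PRECONDITION & SPEC =====
-- Pre_ excludes exactly the single-element lists, on which A raises IndexError (it reads test_list[1]).
def Pre_findAdjacentElements (test_list : List Int) : Prop := test_list.length ≠ 1
instance (test_list : List Int) : Decidable (Pre_findAdjacentElements test_list) := by
  unfold Pre_findAdjacentElements; infer_instance

def pvWitness_findAdjacentElements : List Int := [1, 1, 2, 3, 3, 4]

-- On single-element lists A raises IndexError (it reads test_list[1]); B returns an empty list,
-- since the lone element has no differing neighbor.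
def Raises_findAdjacentElements (test_list : List Int) : Prop := test_list.length = 1
instance (test_list : List Int) : Decidable (Raises_findAdjacentElements test_list) := by
  unfold Raises_findAdjacentElements; infer_instance
def pvRaiseWitness_findAdjacentElements : List Int := [5]
def pvRaiseWitnessOut_findAdjacentElements : List Int := []

def Spec_findAdjacentElements (test_list : List Int) (out : List Int) : Prop :=
  out = findAdjacentElements_alt test_list
instance (test_list : List Int) (out : List Int) : Decidable (Spec_findAdjacentElements test_list out) := by
  unfold Spec_findAdjacentElements; infer_instance

-- ===== CLAIM (what is proved, stated in full; the proofs are below) =====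
def Claim_equal_findAdjacentElements : Prop := ∀ (test_list : List Int),
  Dom_findAdjacentElements test_list → Pre_findAdjacentElements test_list →
  Spec_findAdjacentElements test_list (findAdjacentElements test_list)

def Claim_raises_findAdjacentElements : Prop :=
  (∀ (test_list : List Int), Dom_findAdjacentElements test_list →
    Raises_findAdjacentElements test_list → ¬ Pre_findAdjacentElements test_list) ∧
  (Dom_findAdjacentElements (pvRaiseWitness_findAdjacentElements) ∧
   Raises_findAdjacentElements (pvRaiseWitness_findAdjacentElements) ∧
   findAdjacentElements_alt (pvRaiseWitness_findAdjacentElements) = pvRaiseWitnessOut_findAdjacentElements)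

-- ===== LEMMAS AND PROOFS =====

-- ---- common reference form: adjacent-pair keeps ++ last-element keep ----

-- keeps of positions 0..n-2 (element kept iff it differs from its successor)
def core : List Int → List Int
  | [] => []
  | [_] => []
  | a :: b :: t => (if a ≠ b then [a] else []) ++ core (b :: t)

-- lastKeep a l (l nonempty): [last of l] iff it differs from its predecessor in (a :: l)
def lastKeep : Int → List Int → List Int
  | _, [] => []
  | a, [b] => if a ≠ b then [b] else []
  | _, b :: c :: t => lastKeep b (c :: t)

-- ---- A-side characterisation ----

-- A's branch condition at index j, as a Bool on the Nat index (proof helper)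
def condA (l : List Int) (j : Nat) : Bool :=
  if j = 0 then decide (l.getD 0 0 ≠ l.getD 1 0)
  else if j = l.length - 1 then decide (l.getD j 0 ≠ l.getD (j - 1) 0)
  else decide (l.getD j 0 ≠ l.getD (j + 1) 0)

theorem condA_interior (l : List Int) (j : Nat) (hj : j < l.length - 1) :
    condA l j = decide (l.getD j 0 ≠ l.getD (j + 1) 0) := by
  unfold condA
  by_cases h0 : j = 0
  · subst h0; simp
  · rw [if_neg h0, if_neg (by omega)]

theorem condA_last (l : List Int) (h2 : 2 ≤ l.length) :
    condA l (l.length - 1) = decide (l.getD (l.length - 1) 0 ≠ l.getD (l.length - 2) 0) := by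
  unfold condA
  rw [if_neg (by omega), if_pos rfl, show l.length - 1 - 1 = l.length - 2 from by omega]

-- the adjacent-pair part of A's result, in core's structural form
theorem pairs_eq_core (l : List Int) :
    ((List.range (l.length - 1)).filter
        (fun j => decide (l.getD j 0 ≠ l.getD (j + 1) 0))).map (fun j => l.getD j 0)
    = core l := by
  induction l with
  | nil => rfl
  | cons a t ih =>
    cases t with
    | nil => rfl
    | cons b t' =>
      have hlen : (a :: b :: t').length - 1 = ((b :: t').length - 1) + 1 := by
        simp [List.length]
      rw [hlen, List.range_succ_eq_map, List.filter_cons, List.filter_map]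
      have hcomp :
          ((fun j => decide ((a :: b :: t').getD j 0 ≠ (a :: b :: t').getD (j + 1) 0)) ∘ Nat.succ)
          = fun j => decide ((b :: t').getD j 0 ≠ (b :: t').getD (j + 1) 0) := by
        funext j
        simp [Function.comp, List.getD]
      rw [hcomp]
      have hmap : ∀ X : List Nat,
          List.map (fun j => (a :: b :: t').getD j 0) (List.map Nat.succ X)
          = List.map (fun j => (b :: t').getD j 0) X := by
        intro X
        rw [List.map_map]
        congr 1
      by_cases hab : a = b
      · rw [show (decide ((a :: b :: t').getD 0 0 ≠ (a :: b :: t').getD (0 + 1) 0)) = false by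
            simp [hab]]
        rw [if_neg (by simp), hmap, ih]
        simp [core, hab]
      · rw [show (decide ((a :: b :: t').getD 0 0 ≠ (a :: b :: t').getD (0 + 1) 0)) = true by
            simp [hab]]
        rw [if_pos rfl, List.map_cons, hmap, ih]
        simp [core, hab]

-- lastKeep computes the last-vs-previous comparison of A's final branch
theorem lastKeep_eq (t : List Int) (x : Int) (ht : t ≠ []) :
    lastKeep x t
    = (if (x :: t).getD ((x :: t).length - 1) 0 ≠ (x :: t).getD ((x :: t).length - 2) 0
       then [(x :: t).getD ((x :: t).length - 1) 0] else []) := by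
  induction t generalizing x with
  | nil => exact absurd rfl ht
  | cons b t' ih =>
    cases t' with
    | nil =>
      by_cases h : x = b
      · simp [lastKeep, h, List.getD]
      · simp [lastKeep, h, Ne.symm h, List.getD]
    | cons c t'' =>
      have h1 : (x :: b :: c :: t'').length - 1 = ((b :: c :: t'').length - 1) + 1 := by
        simp
      have h2 : (x :: b :: c :: t'').length - 2 = ((b :: c :: t'').length - 2) + 1 := by
        simp
      rw [show lastKeep x (b :: c :: t'') = lastKeep b (c :: t'') from rfl,
          ih b (by simp), h1, h2, List.getD_cons_succ, List.getD_cons_succ]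

-- A's fold, characterised (for lists of length ≥ 2) as core ++ lastKeep
theorem A_char (x : Int) (t : List Int) (ht : t ≠ []) :
    findAdjacentElements (x :: t) = core (x :: t) ++ lastKeep x t := by
  unfold findAdjacentElements
  set l := x :: t with hl
  have h2 : 2 ≤ l.length := by
    cases t with
    | nil => exact absurd rfl ht
    | cons b t' => simp [hl]
  rw [PySem.List.enumerate_eq_map_pyRange l 0, List.foldl_map,
      show PySem.List.len l = ((l.length : Nat) : Int) from rfl,
      PySem.List.pyRange_zero_natCast, List.foldl_map]
  rw [PySem.List.foldl_congr_mem _ _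
        (fun res (k : Nat) => if condA l k = true then res ++ [l.getD k 0] else res) []
        (by
          intro acc k hk
          have hklt : k < l.length := List.mem_range.mp hk
          simp only []
          by_cases hk0 : k = 0
          · subst hk0
            simp only [Nat.cast_zero]
            rw [if_pos (by trivial)]
            unfold condA
            rw [if_pos rfl]
            have e1 : (0 : Int) + 1 = ((1 : Nat) : Int) := by norm_num
            rw [e1, PySem.List.pyGetD_natCast, PySem.List.pyGetD_ofNat' l 0]
            by_cases hc : l.getD 0 0 = l.getD 1 0 <;> simp [hc]
          · have hne : ((k : Nat) : Int) ≠ 0 := by exact_mod_cast hk0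
            rw [if_neg hne]
            unfold condA
            rw [if_neg hk0]
            by_cases hlast : k = l.length - 1
            · have hInt : ((k : Nat) : Int) = (l.length : Int) - 1 := by omega
              rw [if_pos hInt, if_pos hlast]
              have e1 : ((k : Nat) : Int) - 1 = ((k - 1 : Nat) : Int) := by omega
              rw [e1, PySem.List.pyGetD_natCast, PySem.List.pyGetD_natCast]
              by_cases hc : l.getD k 0 = l.getD (k - 1) 0 <;> simp [hc]
            · have hInt : ((k : Nat) : Int) ≠ (l.length : Int) - 1 := by omega
              rw [if_neg hInt, if_neg hlast]
              have e1 : ((k : Nat) : Int) + 1 = ((k + 1 : Nat) : Int) := by omega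
              rw [e1, PySem.List.pyGetD_natCast, PySem.List.pyGetD_natCast]
              by_cases hc : l.getD k 0 = l.getD (k + 1) 0 <;> simp [hc])]
  rw [PySem.List.foldl_append_if (condA l) (fun j => l.getD j 0) (List.range l.length) []]
  rw [show List.range l.length = List.range (l.length - 1) ++ [l.length - 1] by
        conv_lhs => rw [show l.length = (l.length - 1) + 1 from by omega]
        rw [List.range_succ],
      List.filter_append, List.map_append]
  rw [List.filter_congr (fun j hj => condA_interior l j (List.mem_range.mp hj)),
      pairs_eq_core l]
  have hlast2 : ((List.filter (fun j => condA l j) [l.length - 1]).map (fun j => l.getD j 0))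
      = (if l.getD (l.length - 1) 0 ≠ l.getD (l.length - 2) 0
         then [l.getD (l.length - 1) 0] else []) := by
    rw [List.filter_cons, condA_last l h2]
    by_cases hc : l.getD (l.length - 1) 0 = l.getD (l.length - 2) 0 <;>
      (simp only [List.getD] at hc; simp [hc])
  rw [hlast2, lastKeep_eq t x ht, ← hl, List.nil_append]

-- ---- B-side characterisation ----

-- the emission phase of B, on a run list, in structural form
def emit2 : List (Int × Int) → List Int
  | [] => []
  | [p] => if p.2 = 1 then [p.1] else []
  | p :: q :: rs => p.1 :: emit2 (q :: rs)

-- pvRunStep only touches the last run; a strict prefix passes through the fold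
theorem foldl_runStep_concat (l : List Int) (acc : List (Int × Int)) (v c : Int) :
    List.foldl pvRunStep (acc ++ [(v, c)]) l = acc ++ List.foldl pvRunStep [(v, c)] l := by
  induction l generalizing acc v c with
  | nil => simp
  | cons x t ih =>
    have hstep : pvRunStep (acc ++ [(v, c)]) x
        = if v = x then acc ++ [(v, c + 1)] else (acc ++ [(v, c)]) ++ [(x, 1)] := by
      unfold pvRunStep
      rw [List.getLast?_concat, List.dropLast_concat]
    have hstep1 : pvRunStep [(v, c)] x
        = if v = x then ([] : List (Int × Int)) ++ [(v, c + 1)] else [(v, c)] ++ [(x, 1)] := by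
      unfold pvRunStep
      rfl
    by_cases hvx : v = x
    · rw [List.foldl_cons, hstep, if_pos hvx, ih, List.foldl_cons, hstep1, if_pos hvx,
          List.nil_append]
    · rw [List.foldl_cons, hstep, if_neg hvx, List.foldl_cons, hstep1, if_neg hvx,
          ih (acc ++ [(v, c)]) x 1, ih [(v, c)] x 1, List.append_assoc]

-- B's first loop started on a single run
def gRuns (v c : Int) (l : List Int) : List (Int × Int) :=
  List.foldl pvRunStep [(v, c)] l

theorem gRuns_cons (v c x : Int) (t : List Int) :
    gRuns v c (x :: t) = if v = x then gRuns v (c + 1) t else (v, c) :: gRuns x 1 t := by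
  unfold gRuns
  rw [List.foldl_cons]
  have hstep1 : pvRunStep [(v, c)] x
      = if v = x then [(v, c + 1)] else [(v, c)] ++ [(x, 1)] := by
    unfold pvRunStep; rfl
  by_cases hvx : v = x
  · rw [hstep1, if_pos hvx, if_pos hvx]
  · rw [hstep1, if_neg hvx, if_neg hvx, foldl_runStep_concat t [(v, c)] x 1]
    rfl

theorem gRuns_ne_nil (l : List Int) (v c : Int) : gRuns v c l ≠ [] := by
  induction l generalizing v c with
  | nil => simp [gRuns]
  | cons x t ih =>
    rw [gRuns_cons]
    by_cases hvx : v = x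
    · rw [if_pos hvx]; exact ih v (c + 1)
    · rw [if_neg hvx]; exact List.cons_ne_nil _ _

theorem gRuns_sum (l : List Int) (v c : Int) :
    ((gRuns v c l).map Prod.snd).sum = c + (l.length : Int) := by
  induction l generalizing v c with
  | nil => simp [gRuns]
  | cons x t ih =>
    rw [gRuns_cons]
    by_cases hvx : v = x
    · rw [if_pos hvx, ih v (c + 1)]
      simp; ring
    · rw [if_neg hvx]
      simp [ih x 1]; ring

-- main run-list invariant: emitting gRuns v c l gives the pair keeps of (v :: l)
-- followed by the last-element keep
theorem emit2_gRuns (l : List Int) (v c : Int) (hc : 1 ≤ c) :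
    emit2 (gRuns v c l)
    = core (v :: l)
      ++ (match l with
          | [] => if c = 1 then [v] else []
          | _ :: _ => lastKeep v l) := by
  induction l generalizing v c with
  | nil =>
    simp only [gRuns, List.foldl_nil, emit2, core]
    simp
  | cons x t ih =>
    rw [gRuns_cons]
    by_cases hvx : v = x
    · subst hvx
      rw [if_pos rfl, ih v (c + 1) (by omega)]
      have hc1 : ¬ (c + 1 = 1) := by omega
      cases t with
      | nil => simp [core, lastKeep, hc1]
      | cons y t' => simp [core, lastKeep]
    · rw [if_neg hvx]
      obtain ⟨q, rs, hq⟩ := List.exists_cons_of_ne_nil (gRuns_ne_nil t x 1)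
      rw [hq, show emit2 ((v, c) :: q :: rs) = v :: emit2 (q :: rs) from rfl, ← hq,
          ih x 1 (by omega)]
      cases t with
      | nil => simp [core, lastKeep, hvx]
      | cons y t' => simp [core, lastKeep, hvx]

-- B's emission phase equals emit2 on run lists of length ≥ 2
theorem phase2_eq (rs : List (Int × Int)) (h : 2 ≤ rs.length) :
    (rs.dropLast.map (fun p => p.1)
      ++ (match rs.getLast? with
          | some p => if p.2 = 1 then [p.1] else []
          | none => [])) = emit2 rs := by
  induction rs with
  | nil => simp at h
  | cons p rs' ih =>
    cases rs' with
    | nil => simp at h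
    | cons q rs'' =>
      cases rs'' with
      | nil =>
        by_cases hq : q.2 = 1 <;> simp [emit2, hq]
      | cons r rs''' =>
        have := ih (by simp)
        simp only [List.dropLast_cons₂, List.map_cons, List.getLast?_cons_cons] at this ⊢
        rw [List.cons_append, this]
        rfl

-- factor the shared prefix out of B's final if/match
theorem match_factor (rs : List (Int × Int)) (res : List Int) :
    (match rs.getLast? with
     | some p => if p.2 = 1 then res ++ [p.1] else res
     | none => res)
    = res ++ (match rs.getLast? with
              | some p => if p.2 = 1 then [p.1] else []
              | none => []) := by
  cases hg : rs.getLast? with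
  | none => simp
  | some p => by_cases hp : p.2 = 1 <;> simp [hp]

-- B on a list of length ≥ 2 computes emit2 of its run-length encoding
theorem alt_char (x : Int) (t : List Int) (ht : t ≠ []) :
    findAdjacentElements_alt (x :: t) = emit2 (gRuns x 1 t) := by
  unfold findAdjacentElements_alt
  have hruns : (x :: t).foldl pvRunStep [] = gRuns x 1 t := by
    rw [List.foldl_cons]
    rfl
  simp only [hruns, PySem.List.slice_to_neg_one]
  by_cases hlen : 2 ≤ (gRuns x 1 t).length
  · rw [if_pos hlen, match_factor, phase2_eq (gRuns x 1 t) hlen]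
  · have h1 : (gRuns x 1 t).length = 1 := by
      have := List.length_pos_of_ne_nil (gRuns_ne_nil t x 1)
      omega
    obtain ⟨p, hp⟩ := List.length_eq_one_iff.mp h1
    have hsum := gRuns_sum t x 1
    rw [hp] at hsum ⊢
    simp at hsum
    have hp2 : ¬ (p.2 = 1) := by
      have : 1 ≤ (t.length : Int) := by
        cases t with
        | nil => exact absurd rfl ht
        | cons y t' => simp
      omega
    rw [if_neg (by simp)]
    simp [emit2, hp2]

-- ===== VERDICT (by name: the statement is the Claim_ definition above) =====
theorem findAdjacentElements_spec : Claim_equal_findAdjacentElements := by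
  intro l _ hpre
  unfold Spec_findAdjacentElements
  cases l with
  | nil => decide
  | cons x t =>
    cases t with
    | nil => exact absurd rfl hpre
    | cons y t' =>
      rw [A_char x (y :: t') (by simp), alt_char x (y :: t') (by simp),
          emit2_gRuns (y :: t') x 1 (by omega)]

@[simp]
theorem findAdjacentElements_raises : Claim_raises_findAdjacentElements := by
  unfold Claim_raises_findAdjacentElements
  refine ⟨?_, by decide, by decide, by decide⟩
  intro l _ hr
  unfold Raises_findAdjacentElements at hr
  unfold Pre_findAdjacentElements
  simp [hr]
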